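-- pv_equiv track=rewrite | github.com/dazhiyang/bsrn-qc | src/bsrn/io/reader.py | _collect_lr_blocks
-- ===== SOURCE A (Python) =====
-- def _collect_lr_blocks(lines):
--     """Collect first LR block lines for each marker key (e.g., lr0100)."""
--     markers = [
--         (i, lines[i].strip())
--         for i in range(len(lines))
--         if lines[i].startswith("*")
--     ]
--
--     lr_blocks = {}
--     for idx, (pos, marker) in enumerate(markers):
--         lr_key = f"lr{marker[-4:]}"
--         if lr_key in lr_blocks:
--             continue
--         start = pos + 1
--         end = (
--             markers[idx + 1][0]
--             if idx + 1 < len(markers)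
--             else len(lines)
--         )
--         lr_blocks[lr_key] = lines[start:end]
--     return lr_blocks
-- ===== SOURCE B (Python) =====
-- def _collect_lr_blocks(lines):
--     """Collect first LR block lines for each marker key (single pass)."""
--     blocks = {}
--     current = None
--     for line in lines:
--         if line.startswith("*"):
--             key = f"lr{line.strip()[-4:]}"
--             if key in blocks:
--                 current = None
--             else:
--                 current = []
--                 blocks[key] = current
--         elif current is not None:
--             current.append(line)
--     return blocks
-- ===== Notes on version B (the rewrite author's own statement) =====
-- stated objective: simpler
-- what changed: Replaces A's two-phase scan (collect all marker indices with a range comprehension, then slice lines[pos+1:next_pos] per marker with enumerate lookahead) by a single pass over the lines maintaining the blocks dict and an active-block state, with no index arithmetic or slicing.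
import Mathlib
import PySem

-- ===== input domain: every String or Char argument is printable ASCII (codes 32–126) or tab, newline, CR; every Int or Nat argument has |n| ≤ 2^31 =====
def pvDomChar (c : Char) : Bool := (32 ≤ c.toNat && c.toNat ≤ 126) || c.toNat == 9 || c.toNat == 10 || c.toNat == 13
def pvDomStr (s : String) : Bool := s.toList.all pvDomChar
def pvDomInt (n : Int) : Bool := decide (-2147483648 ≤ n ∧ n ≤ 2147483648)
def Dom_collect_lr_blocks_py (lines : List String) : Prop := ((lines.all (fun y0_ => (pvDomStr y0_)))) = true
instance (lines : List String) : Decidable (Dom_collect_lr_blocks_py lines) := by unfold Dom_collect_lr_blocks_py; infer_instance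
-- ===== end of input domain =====

-- B replaces A's collect-marker-indices-then-slice two-phase scan by a single pass over the
-- lines with an active-block state (simpler decomposition, one traversal, no index arithmetic).

-- ===== PORT A =====
-- literal port of _collect_lr_blocks: comprehension over range(len(lines)) building (pos, stripped)
-- markers, then an enumerate loop slicing lines[pos+1 : next marker pos or len(lines)].
-- markers[idx+1] is ported as pyGetD with a dummy default: the access is guarded by
-- idx + 1 < len(markers), so it is always in range and Python never raises here.
def collect_lr_blocks_py (lines : List String) : List (String × List String) :=
  let markers : List (Int × String) :=
    (PySem.List.pyRange 0 (PySem.List.len lines) 1).foldl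
      (fun acc i =>
        if PySem.Str.startswith (PySem.List.pyGetD lines i "") "*" = true
        then acc ++ [(i, PySem.Str.strip (PySem.List.pyGetD lines i ""))]
        else acc) []
  let d : PySem.Dict String (List String) :=
    (PySem.List.enumerate markers).foldl
      (fun d p =>
        let lr_key := "lr" ++ PySem.Str.slice p.2.2 (some (-4)) none
        if d.contains lr_key then d
        else
          let start := p.2.1 + 1
          let e : Int :=
            if p.1 + 1 < PySem.List.len markers
            then (PySem.List.pyGetD markers (p.1 + 1) (0, "")).1
            else PySem.List.len lines
          d.insert lr_key (PySem.List.slice lines (some start) (some e)))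
      PySem.Dict.empty
  d.items

-- ===== PORT B =====
-- literal port of Source B: one pass, state = (blocks dict, active block key or none).
-- Python's `current` list is an alias of blocks[key]; current.append(line) is therefore
-- ported as modifying the entry at the active key.
def collect_lr_blocks_py_alt (lines : List String) : List (String × List String) :=
  (lines.foldl
    (fun (st : PySem.Dict String (List String) × Option String) line =>
      if PySem.Str.startswith line "*" = true then
        let key := "lr" ++ PySem.Str.slice (PySem.Str.strip line) (some (-4)) none
        if st.1.contains key then (st.1, none)
        else (st.1.insert key [], some key)
      else
        match st.2 with
        | none => st
        | some k => (st.1.modify k [] (fun b => b ++ [line]), some k))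
    (PySem.Dict.empty, none)).1.items

-- ===== PRECONDITION & SPEC =====
def Spec_collect_lr_blocks_py (lines : List String) (out : List (String × List String)) : Prop := out = collect_lr_blocks_py_alt lines
instance (lines : List String) (out : List (String × List String)) : Decidable (Spec_collect_lr_blocks_py lines out) := by unfold Spec_collect_lr_blocks_py; infer_instance

-- ===== CLAIM (what is proved, stated in full; the proofs are below) =====
def Claim_equal_collect_lr_blocks_py : Prop := ∀ (lines : List String), Dom_collect_lr_blocks_py lines → Spec_collect_lr_blocks_py lines (collect_lr_blocks_py lines)

-- ===== LEMMAS AND PROOFS =====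

-- proof-only helpers
def pvIsM (l : String) : Bool := PySem.Str.startswith l "*"
def pvKeyM (mk : String) : String := "lr" ++ PySem.Str.slice mk (some (-4)) none
def pvKey (l : String) : String := pvKeyM (PySem.Str.strip l)
def pvIns (d : PySem.Dict String (List String)) (p : String × List String) :
    PySem.Dict String (List String) :=
  if d.contains p.1 then d else d.insert p.1 p.2

-- the (key, block) segments of the input, first line before the first marker dropped
def pvSegs : List String → List (String × List String)
  | [] => []
  | l :: ls =>
    if pvIsM l
    then (pvKey l, ls.takeWhile (fun x => !pvIsM x)) ::
         pvSegs (ls.dropWhile (fun x => !pvIsM x))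
    else pvSegs ls
termination_by ls => ls.length
decreasing_by
  · simp only [List.length_cons]
    exact Nat.lt_succ_of_le (List.length_dropWhile_le _ _)
  · simp

-- B's loop step (identical to the lambda in collect_lr_blocks_py_alt)
def pvStepB (st : PySem.Dict String (List String) × Option String) (line : String) :
    PySem.Dict String (List String) × Option String :=
  if PySem.Str.startswith line "*" = true then
    let key := "lr" ++ PySem.Str.slice (PySem.Str.strip line) (some (-4)) none
    if st.1.contains key then (st.1, none)
    else (st.1.insert key [], some key)
  else
    match st.2 with
    | none => st
    | some k => (st.1.modify k [] (fun b => b ++ [line]), some k)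

-- A's markers computed with an explicit offset
def pvMks : List String → Int → List (Int × String)
  | [], _ => []
  | l :: ls, c => if pvIsM l then (c, PySem.Str.strip l) :: pvMks ls (c + 1) else pvMks ls (c + 1)

-- each marker paired with the position of the next one (or L)
def pvNexts (ms : List (Int × String)) (L : Int) : List ((Int × String) × Int) :=
  ms.zip ((ms.map Prod.fst).tail ++ [L])

-- A's dict-loop step, rephrased on (marker, next-position) pairs
def pvStepA (lines : List String) (d : PySem.Dict String (List String))
    (q : (Int × String) × Int) : PySem.Dict String (List String) :=
  if d.contains (pvKeyM q.1.2) then d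
  else d.insert (pvKeyM q.1.2) (PySem.List.slice lines (some (q.1.1 + 1)) (some q.2))

theorem pvDropHead (p : String → Bool) :
    ∀ (ls : List String) (l' : String) (r' : List String),
      ls.dropWhile (fun x => !p x) = l' :: r' → p l' = true := by
  intro ls
  induction ls with
  | nil => intro l' r' h; simp [List.dropWhile] at h
  | cons x xs ih =>
    intro l' r' h
    by_cases hx : p x
    · simp [List.dropWhile, hx] at h
      exact h.1 ▸ hx
    · simpa [List.dropWhile, hx] using ih l' r' (by simpa [List.dropWhile, hx] using h)

theorem pvSegs_skip : ∀ (t r : List String), (∀ x ∈ t, pvIsM x = false) →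
    pvSegs (t ++ r) = pvSegs r := by
  intro t
  induction t with
  | nil => intro r _; rfl
  | cons x xs ih =>
    intro r h
    have hx : pvIsM x = false := h x (by simp)
    rw [List.cons_append, pvSegs, if_neg (by simp [hx])]
    exact ih r (fun y hy => h y (by simp [hy]))

theorem pvMks_skip : ∀ (t r : List String) (c : Int), (∀ x ∈ t, pvIsM x = false) →
    pvMks (t ++ r) c = pvMks r (c + t.length) := by
  intro t
  induction t with
  | nil => intro r c _; simp
  | cons x xs ih =>
    intro r c h
    have hx : pvIsM x = false := h x (by simp)
    rw [List.cons_append, pvMks, if_neg (by simp [hx]),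
      ih r (c + 1) (fun y hy => h y (by simp [hy]))]
    congr 1
    push_cast [List.length_cons]
    ring

-- B-side: skipping non-marker lines while inactive
theorem pvB_skip : ∀ (t r : List String) (d : PySem.Dict String (List String)),
    (∀ x ∈ t, pvIsM x = false) →
    (t ++ r).foldl pvStepB (d, none) = r.foldl pvStepB (d, none) := by
  intro t
  induction t with
  | nil => intro r d _; rfl
  | cons x xs ih =>
    intro r d h
    have hx : pvIsM x = false := h x (by simp)
    rw [List.cons_append, List.foldl_cons]
    have : pvStepB (d, none) x = (d, none) := by
      simp [pvStepB, pvIsM] at hx ⊢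
      intro h'; exact absurd h' (by simp [hx])
    rw [this]
    exact ih r d (fun y hy => h y (by simp [hy]))

-- B-side: collecting non-marker lines while active
theorem pvB_collect : ∀ (t : List String) (d : PySem.Dict String (List String))
    (k : String) (v : List String) (r : List String),
    (∀ x ∈ t, pvIsM x = false) →
    (t ++ r).foldl pvStepB (d.insert k v, some k) =
      r.foldl pvStepB (d.insert k (v ++ t), some k) := by
  intro t
  induction t with
  | nil => intro d k v r _; simp
  | cons x xs ih =>
    intro d k v r h
    have hx : pvIsM x = false := h x (by simp)
    rw [List.cons_append, List.foldl_cons]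
    have hstep : pvStepB (d.insert k v, some k) x =
        (d.insert k (v ++ [x]), some k) := by
      simp only [pvIsM] at hx
      simp only [pvStepB, hx]
      simp [PySem.Dict.modify, PySem.Dict.getD_insert_self,
        PySem.Dict.insert_insert_self]
    rw [hstep]
    have := ih d k (v ++ [x]) r (fun y hy => h y (by simp [hy]))
    simpa [List.append_assoc] using this

-- B-side main loop invariant
theorem pvB_main : ∀ (n : Nat) (ls : List String), ls.length ≤ n →
    ∀ (d : PySem.Dict String (List String)) (cur : Option String),
    (cur = none ∨ ∀ l ls', ls = l :: ls' → pvIsM l = true) →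
    (ls.foldl pvStepB (d, cur)).1 = (pvSegs ls).foldl pvIns d := by
  intro n
  induction n with
  | zero =>
    intro ls hlen d cur _
    have : ls = [] := List.eq_nil_of_length_eq_zero (Nat.le_zero.mp hlen)
    subst this; simp [pvSegs]
  | succ n ih =>
    intro ls hlen d cur hcur
    cases ls with
    | nil => simp [pvSegs]
    | cons l ls' =>
      by_cases hm : pvIsM l
      · -- marker line: the step ignores cur
        have hstep : ∀ c : Option String, pvStepB (d, c) l =
            (if d.contains (pvKey l) then (d, none)
             else (d.insert (pvKey l) [], some (pvKey l))) := by
          intro c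
          simp only [pvIsM] at hm
          simp only [pvStepB, hm]
          rfl
        set t := ls'.takeWhile (fun x => !pvIsM x) with ht
        set r := ls'.dropWhile (fun x => !pvIsM x) with hr
        have htr : ls' = t ++ r := (List.takeWhile_append_dropWhile).symm
        have htm : ∀ x ∈ t, pvIsM x = false := by
          intro x hx
          have := List.mem_takeWhile_imp hx
          simpa using this
        have hrhead : ∀ l₂ r₂, r = l₂ :: r₂ → pvIsM l₂ = true := by
          intro l₂ r₂ h; exact pvDropHead pvIsM ls' l₂ r₂ (hr ▸ h)
        have hrlen : r.length ≤ n := by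
          have h1 : r.length ≤ ls'.length := List.length_dropWhile_le _ _
          have h2 : ls'.length ≤ n := Nat.lt_succ_iff.mp (by simpa using hlen)
          omega
        have hsegs : pvSegs (l :: ls') = (pvKey l, t) :: pvSegs r := by
          rw [pvSegs, if_pos hm]
        rw [List.foldl_cons, hstep cur]
        rw [hsegs, List.foldl_cons]
        by_cases hc : d.contains (pvKey l)
        · rw [if_pos hc]
          have hid : pvIns d (pvKey l, t) = d := by simp [pvIns, hc]
          rw [hid]
          conv_lhs => rw [htr]
          rw [pvB_skip t r d htm]
          exact ih r hrlen d none (Or.inl rfl)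
        · rw [if_neg hc]
          have hid : pvIns d (pvKey l, t) = d.insert (pvKey l) t := by
            simp [pvIns, hc]
          rw [hid]
          conv_lhs => rw [htr]
          rw [pvB_collect t d (pvKey l) [] r htm]
          simp only [List.nil_append]
          exact ih r hrlen (d.insert (pvKey l) t) (some (pvKey l)) (Or.inr hrhead)
      · -- non-marker head forces cur = none
        have hcn : cur = none := by
          rcases hcur with h | h
          · exact h
          · exact absurd (h l ls' rfl) (by simp [hm])
        subst hcn
        rw [List.foldl_cons]
        have hstep : pvStepB (d, none) l = (d, none) := by
          have hx : pvIsM l = false := by simpa using hm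
          simp [pvStepB, pvIsM] at hx ⊢
          intro h'; exact absurd h' (by simp [hx])
        rw [hstep]
        have hlen' : ls'.length ≤ n := Nat.lt_succ_iff.mp (by simpa using hlen)
        rw [ih ls' hlen' d none (Or.inl rfl)]
        rw [pvSegs, if_neg hm]

theorem pvB_eq (lines : List String) :
    collect_lr_blocks_py_alt lines = ((pvSegs lines).foldl pvIns PySem.Dict.empty).items := by
  have h := pvB_main lines.length lines (le_refl _) PySem.Dict.empty none (Or.inl rfl)
  show (lines.foldl pvStepB (PySem.Dict.empty, none)).1.items = _
  rw [h]

-- A-side: the port's markers comprehension equals pvMks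
theorem pvMks_range : ∀ (ls : List String) (c : Int),
    ((List.range ls.length).filter
        (fun (j : Nat) => PySem.Str.startswith (PySem.List.pyGetD ls (j : Int) "") "*")).map
      (fun (j : Nat) => ((j : Int) + c, PySem.Str.strip (PySem.List.pyGetD ls (j : Int) ""))) =
    pvMks ls c := by
  intro ls
  induction ls with
  | nil => intro c; simp [pvMks]
  | cons l ls ih =>
    intro c
    have hget0 : PySem.List.pyGetD (l :: ls) ((0 : Nat) : Int) "" = l := by
      rw [PySem.List.pyGetD_natCast (l :: ls) 0]; rfl
    have hgetS : ∀ j : Nat, PySem.List.pyGetD (l :: ls) ((j + 1 : Nat) : Int) "" =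
        PySem.List.pyGetD ls (j : Int) "" := by
      intro j
      rw [PySem.List.pyGetD_natCast (l :: ls) (j + 1), PySem.List.pyGetD_natCast ls j]
      rfl
    rw [List.length_cons, List.range_succ_eq_map, List.filter_cons]
    have htail :
        (List.filter (fun (j : Nat) => PySem.Str.startswith (PySem.List.pyGetD (l :: ls) (j : Int) "") "*")
            (List.map Nat.succ (List.range ls.length))).map
          (fun (j : Nat) => ((j : Int) + c, PySem.Str.strip (PySem.List.pyGetD (l :: ls) (j : Int) ""))) =
        pvMks ls (c + 1) := by
      rw [List.filter_map, List.map_map]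
      rw [← ih (c + 1)]
      rw [List.filter_congr (fun j _ => by
        simp only [Function.comp_apply, Nat.succ_eq_add_one]
        rw [hgetS j])]
      apply List.map_congr_left
      intro j _
      simp only [Function.comp_apply, Nat.succ_eq_add_one, Prod.mk.injEq]
      rw [hgetS j]
      exact ⟨by push_cast; ring, by trivial⟩
    by_cases hm : PySem.Str.startswith (PySem.List.pyGetD (l :: ls) ((0 : Nat) : Int) "") "*"
    · rw [if_pos hm, List.map_cons, htail]
      rw [pvMks, if_pos (by simpa [pvIsM, hget0] using hm)]
      rw [hget0]
      norm_num
    · rw [if_neg hm, htail]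
      rw [pvMks, if_neg (by simpa [pvIsM, hget0] using hm)]

theorem pvMarkers_eq (lines : List String) :
    (PySem.List.pyRange 0 (PySem.List.len lines) 1).foldl
      (fun acc i =>
        if PySem.Str.startswith (PySem.List.pyGetD lines i "") "*" = true
        then acc ++ [(i, PySem.Str.strip (PySem.List.pyGetD lines i ""))]
        else acc) [] = pvMks lines 0 := by
  rw [PySem.List.foldl_append_if
    (fun i => PySem.Str.startswith (PySem.List.pyGetD lines i "") "*")
    (fun i => (i, PySem.Str.strip (PySem.List.pyGetD lines i "")))]
  rw [List.nil_append]
  have hR : PySem.List.pyRange 0 (PySem.List.len lines) 1 =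
      (List.range lines.length).map (fun (k : Nat) => (k : Int)) := by
    rw [PySem.List.len_eq]
    exact PySem.List.pyRange_zero_natCast lines.length
  rw [hR, List.filter_map, List.map_map]
  rw [← pvMks_range lines 0]
  have hfil : (List.range lines.length).filter
      ((fun i => PySem.Str.startswith (PySem.List.pyGetD lines i "") "*") ∘ (fun (k : Nat) => (k : Int))) =
      (List.range lines.length).filter
      (fun (j : Nat) => PySem.Str.startswith (PySem.List.pyGetD lines (j : Int) "") "*") := rfl
  rw [hfil]
  apply List.map_congr_left
  intro j _
  simp only [Function.comp_apply, Prod.mk.injEq]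
  exact ⟨by norm_num, by trivial⟩

-- pvNexts as a map over enumerate (so A's indexed lookahead fold becomes a fold over pvNexts)
theorem pvNexts_eq_enum (ms : List (Int × String)) (L : Int) :
    pvNexts ms L = (PySem.List.enumerate ms).map
      (fun p => (p.2, if p.1 + 1 < PySem.List.len ms
                      then (PySem.List.pyGetD ms (p.1 + 1) (0, "")).1
                      else L)) := by
  apply List.ext_getElem
  · simp [pvNexts, PySem.List.length_enumerate]
    omega
  · intro i h1 h2
    have hi : i < ms.length := by
      simpa [pvNexts, PySem.List.length_enumerate] using h2
    simp only [pvNexts, List.getElem_zip, List.getElem_map]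
    have hilen : i < (PySem.List.enumerate ms).length := by
      rw [PySem.List.length_enumerate]; exact hi
    have henum := PySem.List.getElem_enumerate ms 0 i hilen
    rw [henum]
    simp only [zero_add]
    congr 1
    by_cases hlt : i + 1 < ms.length
    · rw [if_pos (by simp [PySem.List.len_eq]; omega)]
      have : ((i : Int) + 1) = ((i + 1 : Nat) : Int) := by push_cast; ring
      rw [this, PySem.List.pyGetD_natCast]
      rw [List.getElem_append_left (by simp [List.length_tail]; omega)]
      rw [List.getElem_tail]
      simp [hlt]
    · rw [if_neg (by simp [PySem.List.len_eq]; omega)]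
      have hieq : i = ms.length - 1 := by omega
      rw [List.getElem_append_right (by simp [List.length_tail]; omega)]
      simp [List.length_tail, hieq]

-- the enumerate-lookahead fold in port A is the pvStepA fold over pvNexts
theorem pvAfold_eq (lines : List String) (ms : List (Int × String))
    (d : PySem.Dict String (List String)) :
    (PySem.List.enumerate ms).foldl
      (fun d p =>
        let lr_key := "lr" ++ PySem.Str.slice p.2.2 (some (-4)) none
        if d.contains lr_key then d
        else
          let start := p.2.1 + 1
          let e : Int :=
            if p.1 + 1 < PySem.List.len ms
            then (PySem.List.pyGetD ms (p.1 + 1) (0, "")).1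
            else PySem.List.len lines
          d.insert lr_key (PySem.List.slice lines (some start) (some e))) d =
    (pvNexts ms (PySem.List.len lines)).foldl (pvStepA lines) d := by
  rw [pvNexts_eq_enum ms (PySem.List.len lines), List.foldl_map]
  rfl

theorem pvNexts_cons (x : Int × String) (ms : List (Int × String)) (L : Int) :
    pvNexts (x :: ms) L =
      (x, match ms with | [] => L | y :: _ => y.1) :: pvNexts ms L := by
  cases ms with
  | nil => rfl
  | cons y ms' => rfl

-- A-side main lemma: the pvNexts fold computes the segment fold
theorem pvA_main (lines : List String) : ∀ (n c : Nat) (d : PySem.Dict String (List String)),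
    lines.length - c ≤ n →
    (pvNexts (pvMks (lines.drop c) (c : Int)) ((lines.length : Int))).foldl (pvStepA lines) d =
      (pvSegs (lines.drop c)).foldl pvIns d := by
  intro n
  induction n with
  | zero =>
    intro c d hlen
    have : lines.drop c = [] := by
      apply List.drop_eq_nil_of_le; omega
    rw [this]; simp [pvMks, pvNexts, pvSegs]
  | succ n ih =>
    intro c d hlen
    cases hls : lines.drop c with
    | nil => simp [pvMks, pvNexts, pvSegs]
    | cons l ls' =>
      have hcl : c < lines.length := by
        by_contra h
        have hnil : lines.drop c = [] := List.drop_eq_nil_of_le (by omega)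
        rw [hnil] at hls
        cases hls
      have hls' : ls' = lines.drop (c + 1) := by
        have := congrArg List.tail hls
        simpa [List.tail_drop] using this.symm
      by_cases hm : pvIsM l
      · -- marker head
        set t := ls'.takeWhile (fun x => !pvIsM x) with ht
        set r := ls'.dropWhile (fun x => !pvIsM x) with hr
        have htr : ls' = t ++ r := (List.takeWhile_append_dropWhile).symm
        have htm : ∀ x ∈ t, pvIsM x = false := by
          intro x hx
          have := List.mem_takeWhile_imp hx
          simpa using this
        have htpre : t = ls'.take t.length := by
          have hp : t <+: ls' := List.takeWhile_prefix _
          exact List.prefix_iff_eq_take.mp hp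
        have htlen : t.length ≤ ls'.length := by
          rw [htr]; simp
        have hlslen : ls'.length = lines.length - (c + 1) := by
          rw [hls']; simp
        rw [pvMks, if_pos hm]
        have hmks' : pvMks ls' ((c : Int) + 1) = pvMks r ((c : Int) + 1 + t.length) := by
          rw [htr]; exact pvMks_skip t r _ htm
        -- the block of this marker is t
        have hblock : PySem.List.slice lines (some ((c : Int) + 1))
            (some ((c : Int) + 1 + t.length)) = t := by
          have : ((c : Int) + 1) = ((c + 1 : Nat) : Int) := by push_cast; ring
          have h2 : ((c : Int) + 1 + t.length) = ((c + 1 + t.length : Nat) : Int) := by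
            push_cast; ring
          rw [h2, this, PySem.List.slice_natCast]
          rw [← hls']
          have : c + 1 + t.length - (c + 1) = t.length := by omega
          rw [this, ← htpre]
        have hblockL : PySem.List.slice lines (some ((c : Int) + 1))
            (some ((lines.length : Int))) = lines.drop (c + 1) := by
          have : ((c : Int) + 1) = ((c + 1 : Nat) : Int) := by push_cast; ring
          rw [this, PySem.List.slice_natCast]
          exact List.take_of_length_le (by simp)
        have hrlen : lines.length - (c + 1) ≤ n := by omega
        have hsegs : pvSegs (l :: ls') = (pvKey l, t) :: pvSegs r := by
          rw [pvSegs, if_pos hm]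
        rw [hsegs]
        cases hrc : r with
        | nil =>
          -- last marker: next boundary is len(lines); block runs to the end
          have hmksnil : pvMks ls' ((c : Int) + 1) = [] := by
            rw [hmks', hrc]; rfl
          rw [hmksnil, pvNexts_cons]
          rw [List.foldl_cons, List.foldl_cons]
          have htls' : t = ls' := by
            rw [htr, hrc, List.append_nil]
          have hstep : pvStepA lines d (((c : Int), PySem.Str.strip l), (lines.length : Int)) =
              pvIns d (pvKey l, t) := by
            simp only [pvStepA, pvIns, pvKey]
            rw [hblockL, ← hls', ← htls']
          rw [hstep]
          have hnx : pvNexts [] ((lines.length : Int)) = [] := rfl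
          rw [hnx, List.foldl_nil]
          simp [pvSegs]
        | cons m r' =>
          have hmm : pvIsM m = true := pvDropHead pvIsM ls' m r' (hr ▸ hrc)
          have hmksr : pvMks ls' ((c : Int) + 1) =
              (((c : Int) + 1 + t.length), PySem.Str.strip m) :: pvMks r' ((c : Int) + 1 + t.length + 1) := by
            rw [hmks', hrc, pvMks, if_pos hmm]
          rw [hmksr, pvNexts_cons]
          rw [List.foldl_cons]
          have hstep : pvStepA lines d (((c : Int), PySem.Str.strip l), ((c : Int) + 1 + t.length)) =
              pvIns d (pvKey l, t) := by
            simp only [pvStepA, pvIns, pvKey]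
            rw [hblock]
          rw [hstep, ← hmksr]
          have hrecon : pvMks ls' ((c : Int) + 1) = pvMks (lines.drop (c + 1)) ((c + 1 : Nat) : Int) := by
            rw [← hls']; norm_cast
          rw [hrecon, ih (c + 1) (pvIns d (pvKey l, t)) hrlen, ← hls']
          rw [htr, pvSegs_skip t r htm, hrc, List.foldl_cons]
      · -- non-marker head: skipped by both
        rw [pvMks, if_neg hm]
        have hrecon : pvMks ls' ((c : Int) + 1) = pvMks (lines.drop (c + 1)) ((c + 1 : Nat) : Int) := by
          rw [← hls']; norm_cast
        rw [hrecon, ih (c + 1) d (by omega), ← hls']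
        rw [pvSegs, if_neg hm]

theorem pvA_eq (lines : List String) :
    collect_lr_blocks_py lines = ((pvSegs lines).foldl pvIns PySem.Dict.empty).items := by
  show ((PySem.List.enumerate _).foldl _ PySem.Dict.empty).items = _
  rw [pvMarkers_eq lines]
  rw [pvAfold_eq lines (pvMks lines 0) PySem.Dict.empty]
  have h0 : pvMks lines 0 = pvMks (lines.drop 0) ((0 : Nat) : Int) := by simp
  have hL : PySem.List.len lines = ((lines.length : Int)) := by
    simp [PySem.List.len_eq]
  rw [hL, h0, pvA_main lines lines.length 0 PySem.Dict.empty (by omega)]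
  simp

-- ===== VERDICT (by name: the statement is the Claim_ definition above) =====
theorem collect_lr_blocks_py_spec : Claim_equal_collect_lr_blocks_py := by
  intro lines _
  unfold Spec_collect_lr_blocks_py
  rw [pvA_eq lines, pvB_eq lines]
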